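-- pv_equiv track=rewrite | github.com/Viperheel25/Assignments | assignments/assignments2.py | getMaximumPoints
-- ===== SOURCE A (Python) =====
-- def getMaximumPoints(A, B, C, N):
--     final_points = 0
--     for number in range(0,N):
--         x = max(A, B, C)
--         final_points = final_points + x
--         if(x == A):
--             A = A-1
--         elif(x == B):
--             B = B-1
--         else:
--             C =C-1
--         number = number+1
--     return final_points
-- ===== SOURCE B (Python) =====
-- def _series(v, q):
--     # sum of the q terms v, v-1, ..., v-q+1; the numerator is always even
--     return q * (2 * v - q + 1) // 2
--
--
-- def _phases(hi, mid, lo, n):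
--     total = 0
--     # phase 1: the single top sequence, from hi down to mid+1
--     k = min(n, hi - mid)
--     total += _series(hi, k)
--     n -= k
--     # phase 2: two sequences tied at mid, taken pairwise down to lo+1
--     k = min(n, 2 * (mid - lo))
--     total += 2 * _series(mid, k // 2) + (k % 2) * (mid - k // 2)
--     n -= k
--     # phase 3: three sequences tied at lo, taken in rounds of three
--     q, r = divmod(n, 3)
--     return total + 3 * _series(lo, q) + r * (lo - q)
--
--
-- def getMaximumPoints(A, B, C, N):
--     if N <= 0:
--         return 0
--     hi = max(A, B, C)
--     lo = min(A, B, C)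
--     return _phases(hi, A + B + C - hi - lo, lo, N)
-- ===== Notes on version B (the rewrite author's own statement) =====
-- stated objective: faster
-- what changed: Replaces the N-iteration greedy take-the-max loop with an O(1) closed form: sort the three start values, then sum three arithmetic-series phases (single top run, tied pair run, tied triple run).
import Mathlib
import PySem

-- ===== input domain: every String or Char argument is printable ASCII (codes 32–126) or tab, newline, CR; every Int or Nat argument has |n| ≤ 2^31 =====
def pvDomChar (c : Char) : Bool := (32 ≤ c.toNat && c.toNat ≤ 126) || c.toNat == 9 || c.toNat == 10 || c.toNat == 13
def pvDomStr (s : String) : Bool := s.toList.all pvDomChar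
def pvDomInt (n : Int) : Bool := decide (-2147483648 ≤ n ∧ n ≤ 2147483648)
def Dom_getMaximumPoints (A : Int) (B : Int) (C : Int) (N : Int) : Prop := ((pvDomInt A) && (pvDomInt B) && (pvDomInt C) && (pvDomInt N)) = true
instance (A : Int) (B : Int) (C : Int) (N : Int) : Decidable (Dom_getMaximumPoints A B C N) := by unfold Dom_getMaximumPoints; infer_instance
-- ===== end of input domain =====

-- B replaces A's N-iteration greedy loop by a closed form built from three arithmetic-series phases; objective: faster.

-- ===== PORT A =====
-- literal port of A's loop: fold the loop body over range(0, N); state = (final_points, A, B, C)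
def getMaximumPoints (A : Int) (B : Int) (C : Int) (N : Int) : Int :=
  ((PySem.List.pyRange 0 N 1).foldl
    (fun (st : Int × Int × Int × Int) (_ : Int) =>
      let x := max st.2.1 (max st.2.2.1 st.2.2.2)
      if x = st.2.1 then (st.1 + x, st.2.1 - 1, st.2.2.1, st.2.2.2)
      else if x = st.2.2.1 then (st.1 + x, st.2.1, st.2.2.1 - 1, st.2.2.2)
      else (st.1 + x, st.2.1, st.2.2.1, st.2.2.2 - 1))
    (0, A, B, C)).1

-- ===== PORT B =====
-- port of Source B's _series: sum of the q terms v, v-1, ..., v-q+1 (closed form; the numerator is even)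
def pvSeries (v : Int) (q : Int) : Int := PySem.Int.floordiv (q * (2 * v - q + 1)) 2

-- port of Source B's _phases
def pvPhases (hi : Int) (mid : Int) (lo : Int) (n : Int) : Int :=
  let k1 := min n (hi - mid)
  let n1 := n - k1
  let k2 := min n1 (2 * (mid - lo))
  let n2 := n1 - k2
  pvSeries hi k1
    + (2 * pvSeries mid (PySem.Int.floordiv k2 2)
        + PySem.Int.mod k2 2 * (mid - PySem.Int.floordiv k2 2))
    + (3 * pvSeries lo (PySem.Int.floordiv n2 3)
        + PySem.Int.mod n2 3 * (lo - PySem.Int.floordiv n2 3))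

def getMaximumPoints_alt (A : Int) (B : Int) (C : Int) (N : Int) : Int :=
  if N ≤ 0 then 0
  else
    let hi := max A (max B C)
    let lo := min A (min B C)
    pvPhases hi (A + B + C - hi - lo) lo N

-- ===== PRECONDITION & SPEC =====
def Spec_getMaximumPoints (A : Int) (B : Int) (C : Int) (N : Int) (out : Int) : Prop := out = getMaximumPoints_alt A B C N
instance (A : Int) (B : Int) (C : Int) (N : Int) (out : Int) : Decidable (Spec_getMaximumPoints A B C N out) := by unfold Spec_getMaximumPoints; infer_instance

-- ===== CLAIM (what is proved, stated in full; the proofs are below) =====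
def Claim_equal_getMaximumPoints : Prop := ∀ (A : Int) (B : Int) (C : Int) (N : Int), Dom_getMaximumPoints A B C N → Spec_getMaximumPoints A B C N (getMaximumPoints A B C N)

-- ===== LEMMAS AND PROOFS =====

-- A's loop body as a state-transition function
def pvStep (st : Int × Int × Int × Int) : Int × Int × Int × Int :=
  if max st.2.1 (max st.2.2.1 st.2.2.2) = st.2.1 then
    (st.1 + max st.2.1 (max st.2.2.1 st.2.2.2), st.2.1 - 1, st.2.2.1, st.2.2.2)
  else if max st.2.1 (max st.2.2.1 st.2.2.2) = st.2.2.1 then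
    (st.1 + max st.2.1 (max st.2.2.1 st.2.2.2), st.2.1, st.2.2.1 - 1, st.2.2.2)
  else (st.1 + max st.2.1 (max st.2.2.1 st.2.2.2), st.2.1, st.2.2.1, st.2.2.2 - 1)

-- A's loop as structural recursion on the iteration count
def pvLoop (a b c : Int) : Nat → Int
  | 0 => 0
  | n + 1 =>
    if max a (max b c) = a then max a (max b c) + pvLoop (a - 1) b c n
    else if max a (max b c) = b then max a (max b c) + pvLoop a (b - 1) c n
    else max a (max b c) + pvLoop a b (c - 1) n

lemma pvFoldl_const_step (l : List Int) (st : Int × Int × Int × Int) :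
    l.foldl (fun s (_ : Int) => pvStep s) st = pvStep^[l.length] st := by
  induction l generalizing st with
  | nil => rfl
  | cons x xs ih => simp [List.foldl, ih, Function.iterate_succ_apply]

lemma pvIterate_fst (n : Nat) : ∀ (fp a b c : Int),
    (pvStep^[n] (fp, a, b, c)).1 = fp + pvLoop a b c n := by
  induction n with
  | zero => intro fp a b c; simp [pvLoop]
  | succ n ih =>
    intro fp a b c
    rw [Function.iterate_succ_apply]
    simp only [pvStep, pvLoop]
    split_ifs <;> rw [ih] <;> ring

lemma pvA_eq_loop (A B C N : Int) :
    getMaximumPoints A B C N = pvLoop A B C N.toNat := by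
  unfold getMaximumPoints
  have hlam : (fun (st : Int × Int × Int × Int) (_ : Int) =>
      let x := max st.2.1 (max st.2.2.1 st.2.2.2)
      if x = st.2.1 then (st.1 + x, st.2.1 - 1, st.2.2.1, st.2.2.2)
      else if x = st.2.2.1 then (st.1 + x, st.2.1, st.2.2.1 - 1, st.2.2.2)
      else (st.1 + x, st.2.1, st.2.2.1, st.2.2.2 - 1))
      = (fun (st : Int × Int × Int × Int) (_ : Int) => pvStep st) := by
    funext st y; rfl
  rw [hlam, pvFoldl_const_step, PySem.List.length_pyRange_one]
  have := pvIterate_fst ((N - 0).toNat) 0 A B C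
  simpa using this

lemma pvfd2 (a : Int) : PySem.Int.floordiv a 2 = a / 2 :=
  PySem.Int.floordiv_eq_ediv_of_pos (by norm_num)
lemma pvfd3 (a : Int) : PySem.Int.floordiv a 3 = a / 3 :=
  PySem.Int.floordiv_eq_ediv_of_pos (by norm_num)
lemma pvmd2 (a : Int) : PySem.Int.mod a 2 = a % 2 :=
  PySem.Int.mod_eq_emod_of_pos (by norm_num)
lemma pvmd3 (a : Int) : PySem.Int.mod a 3 = a % 3 :=
  PySem.Int.mod_eq_emod_of_pos (by norm_num)

lemma pvSeries_double (v q : Int) : 2 * pvSeries v q = q * (2 * v - q + 1) := by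
  unfold pvSeries
  rw [pvfd2]
  rcases Int.even_or_odd q with ⟨m, hm⟩ | ⟨m, hm⟩
  · subst hm
    have h : (m + m) * (2 * v - (m + m) + 1) = 2 * (m * (2 * v - (m + m) + 1)) := by ring
    rw [h, Int.mul_ediv_cancel_left _ (by norm_num)]
  · subst hm
    have h : (2 * m + 1) * (2 * v - (2 * m + 1) + 1) = 2 * ((2 * m + 1) * (v - m)) := by ring
    rw [h, Int.mul_ediv_cancel_left _ (by norm_num)]

-- peel the top term off a descending series
lemma pvSeries_step (v q : Int) : pvSeries v q = v + pvSeries (v - 1) (q - 1) := by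
  have h1 := pvSeries_double v q
  have h2 := pvSeries_double (v - 1) (q - 1)
  have key : q * (2 * v - q + 1) = 2 * v + (q - 1) * (2 * (v - 1) - (q - 1) + 1) := by ring
  linarith

lemma pvSeries_zero (v : Int) : pvSeries v 0 = 0 := by
  have := pvSeries_double v 0; linarith

lemma pvSeries_one (v : Int) : pvSeries v 1 = v := by
  have := pvSeries_double v 1; linarith

lemma pvPhases_zero (h m l : Int) (hm : m ≤ h) (lm : l ≤ m) : pvPhases h m l 0 = 0 := by
  simp only [pvPhases, pvfd2, pvfd3, pvmd2, pvmd3]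
  rw [show min (0 : Int) (h - m) = 0 by omega]
  rw [show (0 : Int) - 0 = 0 by ring]
  rw [show min (0 : Int) (2 * (m - l)) = 0 by omega]
  have z1 := pvSeries_zero h
  have z2 := pvSeries_zero m
  have z3 := pvSeries_zero l
  have e2 : (0 : Int) / 2 = 0 := by decide
  have e3 : (0 : Int) - 0 = 0 := by ring
  rw [e3, e2, show (0 : Int) / 3 = 0 by decide] at *
  omega

-- one greedy step, in sorted coordinates: take the top value, re-sort
lemma pvPhases_step (n : Nat) (h m l : Int) (hm : m ≤ h) (lm : l ≤ m) :
    pvPhases h m l (↑n + 1) =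
      h + (if m < h then pvPhases (h - 1) m l ↑n
           else if l < m then pvPhases h (m - 1) l ↑n
           else pvPhases h m (l - 1) ↑n) := by
  rcases lt_or_eq_of_le hm with hmh | hmh
  · -- h > m : phase 1 absorbs the step
    rw [if_pos hmh]
    simp only [pvPhases, pvfd2, pvfd3, pvmd2, pvmd3]
    rw [show min ((n : Int)) (h - 1 - m) = min ((n : Int) + 1) (h - m) - 1 by omega]
    rw [show ((n : Int)) - (min ((n : Int) + 1) (h - m) - 1) = (n : Int) + 1 - min ((n : Int) + 1) (h - m) by ring]
    have hs := pvSeries_step h (min ((n : Int) + 1) (h - m))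
    omega
  · -- h = m
    subst hmh
    rw [if_neg (lt_irrefl m)]
    rcases lt_or_eq_of_le lm with hlm | hlm
    · -- m = h > l : phase 2 absorbs the step
      rw [if_pos hlm]
      simp only [pvPhases, pvfd2, pvfd3, pvmd2, pvmd3]
      rw [show min ((n : Int) + 1) (m - m) = 0 by omega]
      rw [show ((n : Int) + 1) - 0 = (n : Int) + 1 by ring]
      rw [show m - (m - 1) = 1 by ring]
      rcases Nat.eq_zero_or_pos n with hn | hn
      · subst hn
        simp only [Nat.cast_zero]
        rw [show min ((0 : Int) + 1) (2 * (m - l)) = 1 by omega]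
        rw [show min ((0 : Int)) (1 : Int) = 0 by decide]
        rw [show ((0 : Int)) - 0 = 0 by ring]
        rw [show min ((0 : Int)) (2 * (m - 1 - l)) = 0 by omega]
        norm_num
        have z1 := pvSeries_zero m
        have z2 := pvSeries_zero l
        have z3 := pvSeries_zero (m - 1)
        omega
      · have hn' : (1 : Int) ≤ (n : Int) := by exact_mod_cast hn
        rw [show min ((n : Int)) (1 : Int) = 1 by omega]
        rw [show min ((n : Int) - 1) (2 * (m - 1 - l)) = min ((n : Int) + 1) (2 * (m - l)) - 2 by omega]
        rw [show (min ((n : Int) + 1) (2 * (m - l)) - 2) / 2 = min ((n : Int) + 1) (2 * (m - l)) / 2 - 1 by omega]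
        rw [show (n : Int) - 1 - (min ((n : Int) + 1) (2 * (m - l)) - 2) = (n : Int) + 1 - min ((n : Int) + 1) (2 * (m - l)) by ring]
        rw [show (min ((n : Int) + 1) (2 * (m - l)) - 2) % 2 = min ((n : Int) + 1) (2 * (m - l)) % 2 by omega]
        rw [show m - 1 - (min ((n : Int) + 1) (2 * (m - l)) / 2 - 1) = m - min ((n : Int) + 1) (2 * (m - l)) / 2 by ring]
        have hs := pvSeries_step m (min ((n : Int) + 1) (2 * (m - l)) / 2)
        have z1 := pvSeries_zero m
        have o1 := pvSeries_one m
        omega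
    · -- h = m = l : phase 3 absorbs the step
      subst hlm
      rw [if_neg (lt_irrefl l)]
      simp only [pvPhases, pvfd2, pvfd3, pvmd2, pvmd3]
      rw [show l - l = (0 : Int) by ring]
      rw [show l - (l - 1) = (1 : Int) by ring]
      rw [show (2 : Int) * 0 = 0 by ring]
      rw [show (2 : Int) * 1 = 2 by ring]
      rw [show min ((n : Int) + 1) 0 = 0 by omega]
      rw [show min ((n : Int)) 0 = 0 by omega]
      rw [show ((n : Int) + 1) - 0 = (n : Int) + 1 by ring]
      rw [show ((n : Int)) - 0 = (n : Int) by ring]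
      rw [show min ((n : Int) + 1) 0 = 0 by omega]
      rw [show ((n : Int) + 1) - 0 = (n : Int) + 1 by ring]
      rcases n with _ | _ | k
      · push_cast
        norm_num [min_def]
        have z1 := pvSeries_zero l
        have z2 := pvSeries_zero (l - 1)
        omega
      · push_cast
        norm_num [min_def]
        have z1 := pvSeries_zero l
        have z2 := pvSeries_zero (l - 1)
        omega
      · push_cast
        rw [show min ((k : Int) + 1 + 1) 2 = 2 by omega]
        rw [show ((2 : Int)) / 2 = 1 by decide]
        rw [show ((k : Int) + 1 + 1) - 2 = ((k : Int) + 1 + 1 + 1) - 3 by ring]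
        rw [show (((k : Int) + 1 + 1 + 1) - 3) / 3 = ((k : Int) + 1 + 1 + 1) / 3 - 1 by omega]
        rw [show (((k : Int) + 1 + 1 + 1) - 3) % 3 = ((k : Int) + 1 + 1 + 1) % 3 by omega]
        rw [show l - 1 - (((k : Int) + 1 + 1 + 1) / 3 - 1) = l - ((k : Int) + 1 + 1 + 1) / 3 by ring]
        have hs := pvSeries_step l (((k : Int) + 1 + 1 + 1) / 3)
        have z1 := pvSeries_zero l
        have o1 := pvSeries_one l
        have z2 := pvSeries_zero (l - 1)
        omega

lemma pvPhases_congr (h1 m1 l1 h2 m2 l2 n : Int) (eh : h1 = h2) (em : m1 = m2) (el : l1 = l2) :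
    pvPhases h1 m1 l1 n = pvPhases h2 m2 l2 n := by rw [eh, em, el]

lemma pvAlt_as_phases (n : Nat) (a b c : Int) :
    getMaximumPoints_alt a b c ↑n
      = pvPhases (max a (max b c)) (a + b + c - max a (max b c) - min a (min b c)) (min a (min b c)) ↑n := by
  cases n with
  | zero =>
    simp only [Nat.cast_zero, getMaximumPoints_alt, if_pos (le_refl (0 : Int))]
    rw [pvPhases_zero _ _ _ (by omega) (by omega)]
  | succ k =>
    unfold getMaximumPoints_alt
    rw [if_neg (by push_cast; omega)]

lemma pvLoop_eq_alt (n : Nat) : ∀ (a b c : Int), pvLoop a b c n = getMaximumPoints_alt a b c ↑n := by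
  induction n with
  | zero =>
    intro a b c
    simp [pvLoop, getMaximumPoints_alt]
  | succ n ih =>
    intro a b c
    rw [pvAlt_as_phases (n + 1) a b c]
    rw [show (((n + 1 : Nat)) : Int) = (n : Int) + 1 by push_cast; ring]
    rw [pvPhases_step n _ _ _ (by omega) (by omega)]
    simp only [pvLoop]
    split_ifs <;> rw [ih, pvAlt_as_phases] <;>
      exact congrArg _ (pvPhases_congr _ _ _ _ _ _ _ (by omega) (by omega) (by omega))

-- ===== VERDICT (by name: the statement is the Claim_ definition above) =====
theorem getMaximumPoints_spec : Claim_equal_getMaximumPoints := by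
  intro A B C N _
  unfold Spec_getMaximumPoints
  rw [pvA_eq_loop, pvLoop_eq_alt]
  rcases le_or_gt N 0 with hN | hN
  · rw [show N.toNat = 0 by omega]
    simp [getMaximumPoints_alt, hN]
  · congr 1
    omega
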